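-- pv_equiv track=rewrite | github.com/makyr90/AoC_2023 | Day_13.py | find_reflection_index
-- ===== SOURCE A (Python) =====
-- def count_diffs(_str1: str, _str2: str) -> int:
--
--     return sum([0 if x == z else 1 for x, z in zip(_str1, _str2)])
--
-- def find_reflection_index(_pattern: list[str], allowed_dif: int = 0) -> int:
--     reflection_index = 0
--     for idx in range(len(_pattern)-1):
--         if count_diffs(_pattern[idx], _pattern[idx+1]) in [0, allowed_dif]:
--             sum_dif = 0
--             valid = False
--             if count_diffs(_pattern[idx], _pattern[idx + 1]) == allowed_dif:
--                 sum_dif += allowed_dif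
--             step = 2
--             if idx + step >= len(_pattern) or idx - step + 1 < 0:
--                 if sum_dif == allowed_dif:
--                     valid = True
--
--             while idx+step < len(_pattern) and idx-step+1 >= 0:
--                 if count_diffs(_pattern[idx+step], _pattern[idx-step+1]) in [0, allowed_dif]:
--                     valid = True
--                     if count_diffs(_pattern[idx + step], _pattern[idx - step + 1]) == allowed_dif:
--                         sum_dif += allowed_dif
--                     if sum_dif > allowed_dif:
--                         valid = False
--                         break
--                     step += 1
--                     continue
--                 else:
--                     valid = False
--                     break
--             if valid and sum_dif == allowed_dif:
--                 reflection_index = idx + 1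
--
--     return reflection_index
-- ===== SOURCE B (Python) =====
-- def find_reflection_index(_pattern: list[str], allowed_dif: int = 0) -> int:
--     result = 0
--     for idx in range(len(_pattern) - 1):
--         top = _pattern[:idx + 1][::-1]
--         bottom = _pattern[idx + 1:]
--         diffs = [sum(x != y for x, y in zip(a, b)) for a, b in zip(top, bottom)]
--         if sum(diffs) == allowed_dif and all(d in (0, allowed_dif) for d in diffs):
--             result = idx + 1
--     return result
-- ===== Notes on version B (the rewrite author's own statement) =====
-- stated objective: simpler
-- what changed: B replaces A's step/valid/sum_dif while-loop state machine by one slice-and-zip comprehension computing each mirrored-pair diff count once per candidate axis (A calls count_diffs twice per pair), accepting iff the diffs total allowed_dif and each pair diff is 0 or allowed_dif.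
import Mathlib
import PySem

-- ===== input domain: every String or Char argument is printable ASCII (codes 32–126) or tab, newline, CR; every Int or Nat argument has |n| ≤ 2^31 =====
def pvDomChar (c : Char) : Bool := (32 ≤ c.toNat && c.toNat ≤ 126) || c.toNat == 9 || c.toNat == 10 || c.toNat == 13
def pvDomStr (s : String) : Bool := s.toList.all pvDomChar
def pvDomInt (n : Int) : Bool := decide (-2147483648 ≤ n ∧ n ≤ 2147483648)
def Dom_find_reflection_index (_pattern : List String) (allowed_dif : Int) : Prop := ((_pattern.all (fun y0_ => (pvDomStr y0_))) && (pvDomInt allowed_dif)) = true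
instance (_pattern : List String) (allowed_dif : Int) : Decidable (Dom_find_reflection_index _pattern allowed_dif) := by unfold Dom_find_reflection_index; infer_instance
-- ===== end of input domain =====

-- B replaces A's step/valid/sum_dif while-loop state machine by a single slice-and-zip
-- comprehension per candidate axis, accepted iff the total of the mirrored-pair diff
-- counts equals allowed_dif and each pair diff is 0 or allowed_dif (objective: simpler).


-- ===== PORT A =====
-- count_diffs: sum([0 if x == z else 1 for x, z in zip(_str1, _str2)])
def pvCountDiffs (_str1 _str2 : String) : Int :=
  ((_str1.toList.zip _str2.toList).map (fun xz => if xz.1 = xz.2 then (0 : Int) else 1)).sum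

-- the inner 'while idx+step < len(_pattern) and idx-step+1 >= 0: …' loop; fuel bounds the
-- iteration count (the loop advances step, so it runs fewer than _pattern.length times).
def pvWhileA (p : List String) (allowed_dif : Int) (idx : Int) :
    Nat → Int → Int → Bool → Bool × Int
  | 0, _, sum_dif, valid => (valid, sum_dif)
  | fuel+1, step, sum_dif, valid =>
    if idx + step < (p.length : Int) ∧ idx - step + 1 ≥ 0 then
      let d := pvCountDiffs (PySem.List.pyGetD p (idx + step) "")
                            (PySem.List.pyGetD p (idx - step + 1) "")
      if d = 0 ∨ d = allowed_dif then
        let sum' := if d = allowed_dif then sum_dif + allowed_dif else sum_dif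
        if sum' > allowed_dif then (false, sum')
        else pvWhileA p allowed_dif idx fuel (step + 1) sum' true
      else (false, sum_dif)
    else (valid, sum_dif)

def find_reflection_index (_pattern : List String) (allowed_dif : Int) : Int :=
  let n : Int := (_pattern.length : Int)
  (PySem.List.pyRange 0 (n - 1) 1).foldl (fun reflection_index idx =>
    let d0 := pvCountDiffs (PySem.List.pyGetD _pattern idx "")
                           (PySem.List.pyGetD _pattern (idx + 1) "")
    if d0 = 0 ∨ d0 = allowed_dif then
      -- sum_dif = 0; if count_diffs(...) == allowed_dif: sum_dif += allowed_dif
      let sum0 : Int := if d0 = allowed_dif then 0 + allowed_dif else 0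
      -- step = 2; if idx+step >= len or idx-step+1 < 0: valid = (sum_dif == allowed_dif)
      let valid0 : Bool :=
        if idx + 2 ≥ n ∨ idx - 2 + 1 < 0 then decide (sum0 = allowed_dif) else false
      let r := pvWhileA _pattern allowed_dif idx _pattern.length 2 sum0 valid0
      if r.1 = true ∧ r.2 = allowed_dif then idx + 1 else reflection_index
    else reflection_index) 0

-- ===== PORT B =====
def find_reflection_index_alt (_pattern : List String) (allowed_dif : Int) : Int :=
  let n : Int := (_pattern.length : Int)
  (PySem.List.pyRange 0 (n - 1) 1).foldl (fun result idx =>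
    -- top = _pattern[:idx+1][::-1]; bottom = _pattern[idx+1:]
    let top := (PySem.List.slice? (PySem.List.slice _pattern none (some (idx + 1))) none none (-1)).getD []
    let bottom := PySem.List.slice _pattern (some (idx + 1)) none
    -- diffs = [sum(x != y for x, y in zip(a, b)) for a, b in zip(top, bottom)]
    let diffs := (top.zip bottom).map (fun ab =>
      ((ab.1.toList.zip ab.2.toList).map (fun xy => if xy.1 ≠ xy.2 then (1 : Int) else 0)).sum)
    if diffs.sum = allowed_dif ∧ ∀ d ∈ diffs, d = 0 ∨ d = allowed_dif then idx + 1
    else result) 0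

-- ===== PRECONDITION & SPEC =====
def Spec_find_reflection_index (_pattern : List String) (allowed_dif : Int) (out : Int) : Prop := out = find_reflection_index_alt _pattern allowed_dif
instance (_pattern : List String) (allowed_dif : Int) (out : Int) : Decidable (Spec_find_reflection_index _pattern allowed_dif out) := by unfold Spec_find_reflection_index; infer_instance

-- ===== CLAIM (what is proved, stated in full; the proofs are below) =====
def Claim_equal_find_reflection_index : Prop := ∀ (_pattern : List String) (allowed_dif : Int), Dom_find_reflection_index _pattern allowed_dif → Spec_find_reflection_index _pattern allowed_dif (find_reflection_index _pattern allowed_dif)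

-- ===== LEMMAS AND PROOFS =====

lemma pvCountDiffs_nonneg (a b : String) : 0 ≤ pvCountDiffs a b := by
  apply List.sum_nonneg
  intro x hx
  simp only [List.mem_map] at hx
  obtain ⟨xz, -, rfl⟩ := hx
  split <;> norm_num

lemma pvZipSum_comm (l1 l2 : List Char) :
    ((l1.zip l2).map (fun xz => if xz.1 = xz.2 then (0 : Int) else 1)).sum
      = ((l2.zip l1).map (fun xz => if xz.1 = xz.2 then (0 : Int) else 1)).sum := by
  induction l1 generalizing l2 with
  | nil => cases l2 <;> simp
  | cons x xs ih =>
    cases l2 with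
    | nil => simp
    | cons y ys => simp [ih ys, eq_comm]

lemma pvCountDiffs_comm (a b : String) : pvCountDiffs a b = pvCountDiffs b a := by
  unfold pvCountDiffs; exact pvZipSum_comm _ _

lemma pvCountDiffs_alt (a b : String) :
    ((a.toList.zip b.toList).map (fun xy => if xy.1 ≠ xy.2 then (1 : Int) else 0)).sum
      = pvCountDiffs a b := by
  unfold pvCountDiffs
  congr 1
  apply List.map_congr_left
  intro xz _
  by_cases h : xz.1 = xz.2 <;> simp [h]

-- the reference loop over an explicit list of pair-diff counts
def pvLoop (allowed : Int) : List Int → Int → Bool → Bool × Int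
  | [], s, v => (v, s)
  | d :: ds, s, v =>
    if d = 0 ∨ d = allowed then
      let s' := if d = allowed then s + allowed else s
      if s' > allowed then (false, s')
      else pvLoop allowed ds s' true
    else (false, s)

-- the list of pair-diff counts the while loop visits, starting at 'step'
def pvMirror (p : List String) (idx : Int) : Nat → Int → List Int
  | 0, _ => []
  | fuel+1, step =>
    if idx + step < (p.length : Int) ∧ idx - step + 1 ≥ 0 then
      pvCountDiffs (PySem.List.pyGetD p (idx + step) "") (PySem.List.pyGetD p (idx - step + 1) "")
        :: pvMirror p idx fuel (step + 1)
    else []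

lemma pvWhileA_eq_loop (p : List String) (a idx : Int) :
    ∀ (fuel : Nat) (step s : Int) (v : Bool),
      pvWhileA p a idx fuel step s v = pvLoop a (pvMirror p idx fuel step) s v := by
  intro fuel
  induction fuel with
  | zero => intro step s v; simp [pvWhileA, pvMirror, pvLoop]
  | succ fuel ih =>
    intro step s v
    simp only [pvWhileA, pvMirror]
    by_cases hc : idx + step < (p.length : Int) ∧ idx - step + 1 ≥ 0
    · simp only [if_pos hc, pvLoop]
      split_ifs <;> first | rfl | exact ih _ _ _
    · simp [if_neg hc, pvLoop]

lemma pvLoop_char (a : Int) :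
    ∀ (ds : List Int), (∀ d ∈ ds, 0 ≤ d) → ∀ (s : Int) (v : Bool),
      (pvLoop a ds s v = (true, a)) ↔
        ((∀ d ∈ ds, d = 0 ∨ d = a)
          ∧ s + a * (ds.countP (fun d => decide (d = a)) : Int) = a
          ∧ (ds = [] → v = true)) := by
  intro ds
  induction ds with
  | nil =>
    intro _ s v
    constructor
    · intro h
      simp [pvLoop, Prod.ext_iff] at h
      simp [h.1, h.2]
    · intro ⟨_, hs, hv⟩
      simp [pvLoop, hv rfl, Prod.ext_iff]
      simpa using hs
  | cons d ds ih =>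
    intro hnn s v
    have hdnn : 0 ≤ d := hnn d (by simp)
    have hdsnn : ∀ x ∈ ds, 0 ≤ x := fun x hx => hnn x (by simp [hx])
    simp only [pvLoop]
    by_cases hd : d = 0 ∨ d = a
    · simp only [if_pos hd]
      set s' : Int := if d = a then s + a else s with hs'
      have hcnt : s + a * ((d :: ds).countP (fun d => decide (d = a)) : Int)
          = s' + a * (ds.countP (fun d => decide (d = a)) : Int) := by
        by_cases hda : d = a <;> simp [List.countP_cons, hda, hs'] <;> push_cast <;> ring
      by_cases hgt : s' > a
      · simp only [if_pos hgt]
        constructor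
        · intro h; exact absurd h (by simp [Prod.ext_iff])
        · rintro ⟨hall, hsum, -⟩
          exfalso
          rw [hcnt] at hsum
          by_cases hge : 0 ≤ a
          · have : 0 ≤ a * (ds.countP (fun d => decide (d = a)) : Int) :=
              mul_nonneg hge (by positivity)
            omega
          · have hlt : a < 0 := by omega
            have hz : ds.countP (fun d => decide (d = a)) = 0 := by
              rw [List.countP_eq_zero]
              intro x hx
              rcases hall x (by simp [hx]) with h0 | ha
              · simp [h0]; omega
              · exfalso; have := hdsnn x hx; omega
            rw [hz] at hsum; simp at hsum; omega
      · simp only [if_neg hgt]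
        rw [ih hdsnn s' true]
        constructor
        · rintro ⟨hall, hsum, -⟩
          refine ⟨fun x hx => ?_, by rw [hcnt]; exact hsum, by simp⟩
          rcases List.mem_cons.mp hx with rfl | hx
          · exact hd
          · exact hall x hx
        · rintro ⟨hall, hsum, -⟩
          exact ⟨fun x hx => hall x (by simp [hx]), by rw [← hcnt]; exact hsum, by simp⟩
    · simp only [if_neg hd]
      constructor
      · intro h; exact absurd h (by simp [Prod.ext_iff])
      · rintro ⟨hall, -, -⟩
        exact absurd (hall d (by simp)) hd

lemma pvMirror_nonneg (p : List String) (idx : Int) :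
    ∀ (fuel : Nat) (step : Int), ∀ d ∈ pvMirror p idx fuel step, 0 ≤ d := by
  intro fuel
  induction fuel with
  | zero => intro step d hd; simp [pvMirror] at hd
  | succ fuel ih =>
    intro step d hd
    simp only [pvMirror] at hd
    split at hd
    · rcases List.mem_cons.mp hd with rfl | h
      · exact pvCountDiffs_nonneg _ _
      · exact ih _ d h
    · simp at hd

lemma pvMirror_eq_map (p : List String) (idx : Int) :
    ∀ (fuel : Nat) (step : Int),
      min ((p.length : Int) - idx - step).toNat (idx - step + 2).toNat ≤ fuel →
      pvMirror p idx fuel step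
        = (List.range (min ((p.length : Int) - idx - step).toNat (idx - step + 2).toNat)).map
            (fun (j : Nat) => pvCountDiffs (PySem.List.pyGetD p (idx + step + (j : Int)) "")
                                   (PySem.List.pyGetD p (idx - step + 1 - (j : Int)) "")) := by
  intro fuel
  induction fuel with
  | zero =>
    intro step h
    have h0 : min ((p.length : Int) - idx - step).toNat (idx - step + 2).toNat = 0 := by omega
    rw [h0]
    simp [pvMirror]
  | succ fuel ih =>
    intro step h
    by_cases hc : idx + step < (p.length : Int) ∧ idx - step + 1 ≥ 0
    · have hm : min ((p.length : Int) - idx - step).toNat (idx - step + 2).toNat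
          = (min ((p.length : Int) - idx - (step + 1)).toNat (idx - (step + 1) + 2).toNat) + 1 := by
        omega
      rw [hm, List.range_succ_eq_map]
      simp only [pvMirror, if_pos hc, List.map_cons, List.map_map]
      congr 1
      · norm_num
      · rw [ih (step + 1) (by omega)]
        apply List.map_congr_left
        intro j hj
        have e1 : (idx + step + (↑(Nat.succ j) : Int)) = idx + (step + 1) + ↑j := by
          push_cast; ring
        have e2 : (idx - step + 1 - (↑(Nat.succ j) : Int)) = idx - (step + 1) + 1 - ↑j := by
          push_cast; ring
        simp only [Function.comp_apply, e1, e2]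
    · have hm : min ((p.length : Int) - idx - step).toNat (idx - step + 2).toNat = 0 := by
        push_neg at hc
        omega
      rw [hm]
      simp [pvMirror, if_neg hc]

lemma pvMirror_nil_imp (p : List String) (idx : Int) (fuel : Nat) (step : Int) (hf : 0 < fuel)
    (h : pvMirror p idx fuel step = []) :
    ¬(idx + step < (p.length : Int) ∧ idx - step + 1 ≥ 0) := by
  intro hc
  cases fuel with
  | zero => omega
  | succ fuel => simp only [pvMirror, if_pos hc] at h; exact List.cons_ne_nil _ _ h

-- the list of all mirrored-pair diff counts around the axis between idx and idx+1
def pvPairs (p : List String) (idx : Int) : List Int :=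
  (List.range (min (idx + 1).toNat (p.length - (idx + 1).toNat))).map
    (fun (k : Nat) => pvCountDiffs (PySem.List.pyGetD p (idx - (k : Int)) "") (PySem.List.pyGetD p (idx + 1 + (k : Int)) ""))

lemma pvPairs_eq_cons (p : List String) (idx : Int) (h0 : 0 ≤ idx)
    (h1 : idx < (p.length : Int) - 1) :
    pvPairs p idx
      = pvCountDiffs (PySem.List.pyGetD p idx "") (PySem.List.pyGetD p (idx + 1) "")
        :: pvMirror p idx p.length 2 := by
  rw [pvMirror_eq_map p idx p.length 2 (by omega)]
  unfold pvPairs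
  have hM : min (idx + 1).toNat (p.length - (idx + 1).toNat)
      = (min ((p.length : Int) - idx - 2).toNat (idx - 2 + 2).toNat) + 1 := by omega
  rw [hM, List.range_succ_eq_map]
  simp only [List.map_cons, List.map_map]
  congr 1
  · norm_num
  · apply List.map_congr_left
    intro j hj
    have e1 : (idx + 1 + (↑(Nat.succ j) : Int)) = idx + 2 + ↑j := by push_cast; ring
    have e2 : (idx - (↑(Nat.succ j) : Int)) = idx - 2 + 1 - ↑j := by push_cast; ring
    simp only [Function.comp_apply, e1, e2]
    rw [pvCountDiffs_comm]

lemma pvAlt_diffs_eq (p : List String) (idx : Int) (h0 : 0 ≤ idx)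
    (h1 : idx < (p.length : Int) - 1) :
    (((List.take (idx + 1).toNat p).reverse.zip (List.drop (idx + 1).toNat p)).map
        (fun ab => pvCountDiffs ab.1 ab.2)) = pvPairs p idx := by
  have hlen : (idx + 1).toNat ≤ p.length := by omega
  apply List.ext_getElem
  · simp [pvPairs]
  · intro k hk1 hk2
    have hkM : k < min (idx + 1).toNat (p.length - (idx + 1).toNat) := by
      simp at hk1; omega
    simp only [List.getElem_map, List.getElem_zip, List.getElem_reverse, List.getElem_take,
      List.getElem_drop]
    unfold pvPairs
    simp only [List.getElem_map, List.getElem_range]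
    rw [PySem.List.pyGetD_eq_getElem p "" (by omega) (by omega),
        PySem.List.pyGetD_eq_getElem p "" (by omega) (by omega)]
    have hr1 : (List.take (idx + 1).toNat p).length - 1 - k < p.length := by
      simp [List.length_take]; omega
    have hr2 : (idx + 1).toNat + k < p.length := by omega
    rw [← List.getD_eq_getElem p "" hr1, ← List.getD_eq_getElem p "" hr2,
        ← List.getD_eq_getElem p "" (by omega : (idx - (k : Int)).toNat < p.length),
        ← List.getD_eq_getElem p "" (by omega : (idx + 1 + (k : Int)).toNat < p.length)]
    have htl : (List.take (idx + 1).toNat p).length = (idx + 1).toNat := by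
      rw [List.length_take]; omega
    congr 1
    · rw [htl, show (idx + 1).toNat - 1 - k = (idx - (k : Int)).toNat from by omega]
    · rw [show (idx + 1).toNat + k = (idx + 1 + (k : Int)).toNat from by omega]

lemma pvSum_eq_mul_countP (a : Int) :
    ∀ (L : List Int), (∀ d ∈ L, d = 0 ∨ d = a) →
      L.sum = a * (L.countP (fun d => decide (d = a)) : Int) := by
  intro L
  induction L with
  | nil => simp
  | cons d ds ih =>
    intro hall
    have hds := ih (fun x hx => hall x (by simp [hx]))
    by_cases hd : d = a
    · simp [List.countP_cons, hd, hds]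
      push_cast
      ring
    · have hd0 : d = 0 := by rcases hall d (by simp) with h | h; exact h; exact absurd h hd
      simp [List.countP_cons, hd, hd0, hds]
      omega

lemma pv_body_eq (p : List String) (a idx acc : Int) (h0 : 0 ≤ idx)
    (h1 : idx < (p.length : Int) - 1) :
    (let d0 := pvCountDiffs (PySem.List.pyGetD p idx "") (PySem.List.pyGetD p (idx + 1) "")
     if d0 = 0 ∨ d0 = a then
       let sum0 : Int := if d0 = a then 0 + a else 0
       let valid0 : Bool :=
         if idx + 2 ≥ (p.length : Int) ∨ idx - 2 + 1 < 0 then decide (sum0 = a) else false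
       let r := pvWhileA p a idx p.length 2 sum0 valid0
       if r.1 = true ∧ r.2 = a then idx + 1 else acc
     else acc)
      = (if (pvPairs p idx).sum = a ∧ ∀ d ∈ pvPairs p idx, d = 0 ∨ d = a then idx + 1
         else acc) := by
  simp only []
  set d0 := pvCountDiffs (PySem.List.pyGetD p idx "") (PySem.List.pyGetD p (idx + 1) "") with hd0def
  set s0 : Int := if d0 = a then 0 + a else 0 with hs0def
  set v0 : Bool :=
    if idx + 2 ≥ (p.length : Int) ∨ idx - 2 + 1 < 0 then decide (s0 = a) else false with hv0def
  have hMnn := pvMirror_nonneg p idx p.length 2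
  have hpairs := pvPairs_eq_cons p idx h0 h1
  have key : ((d0 = 0 ∨ d0 = a) ∧ pvWhileA p a idx p.length 2 s0 v0 = (true, a)) ↔
      ((pvPairs p idx).sum = a ∧ ∀ d ∈ pvPairs p idx, d = 0 ∨ d = a) := by
    rw [pvWhileA_eq_loop, pvLoop_char a _ hMnn, hpairs]
    constructor
    · rintro ⟨hd, hall, hsum, -⟩
      have hall' : ∀ d ∈ d0 :: pvMirror p idx p.length 2, d = 0 ∨ d = a := by
        intro x hx
        rcases List.mem_cons.mp hx with rfl | hx
        · exact hd
        · exact hall x hx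
      refine ⟨?_, hall'⟩
      rw [pvSum_eq_mul_countP a _ hall', List.countP_cons]
      by_cases hda : d0 = a
      · simp only [hs0def, if_pos hda] at hsum
        simp [hda]
        push_cast
        linarith
      · simp only [hs0def, if_neg hda] at hsum
        simp [hda]
        linarith
    · rintro ⟨hsum', hall'⟩
      have hd : d0 = 0 ∨ d0 = a := hall' d0 (by simp [hd0def])
      have hallM : ∀ d ∈ pvMirror p idx p.length 2, d = 0 ∨ d = a := fun x hx =>
        hall' x (by simp [hx])
      have hsum : s0 + a * ((pvMirror p idx p.length 2).countP (fun d => decide (d = a)) : Int)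
          = a := by
        rw [pvSum_eq_mul_countP a _ hall', List.countP_cons, ← hd0def] at hsum'
        by_cases hda : d0 = a
        · simp only [hda, decide_true, if_pos rfl] at hsum'
          simp only [hs0def, if_pos hda]
          push_cast at hsum' ⊢
          linarith
        · simp only [hs0def, if_neg hda]
          simp [hda] at hsum'
          linarith
      refine ⟨hd, hallM, hsum, ?_⟩
      intro hMnil
      have hb : ¬(idx + 2 < (p.length : Int) ∧ idx - 2 + 1 ≥ 0) :=
        pvMirror_nil_imp p idx p.length 2 (by omega) hMnil
      have hbnd : idx + 2 ≥ (p.length : Int) ∨ idx - 2 + 1 < 0 := by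
        push_neg at hb
        by_cases hx : idx + 2 < (p.length : Int)
        · right; exact hb hx
        · left; omega
      have hs0a : s0 = a := by
        rw [hMnil] at hsum
        simpa using hsum
      simp [hv0def, hbnd, hs0a]
  have hr : ∀ (r : Bool × Int), (r.1 = true ∧ r.2 = a) ↔ r = (true, a) := by
    intro r
    rw [Prod.ext_iff]
  by_cases hB : (pvPairs p idx).sum = a ∧ ∀ d ∈ pvPairs p idx, d = 0 ∨ d = a
  · obtain ⟨hd, hwr⟩ := key.mpr hB
    rw [if_pos hd, if_pos ((hr _).mpr hwr), if_pos hB]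
  · rw [if_neg hB]
    by_cases hd : d0 = 0 ∨ d0 = a
    · rw [if_pos hd, if_neg (fun hw => hB (key.mp ⟨hd, (hr _).mp hw⟩))]
    · rw [if_neg hd]

theorem find_reflection_index_spec : Claim_equal_find_reflection_index := by
  intro p a _
  unfold Spec_find_reflection_index find_reflection_index find_reflection_index_alt
  simp only []
  apply PySem.List.foldl_congr_mem
  intro acc idx hidx
  obtain ⟨hge, hlt⟩ := PySem.List.mem_pyRange_one.mp hidx
  have hslice1 : PySem.List.slice p none (some (idx + 1)) = List.take (idx + 1).toNat p :=
    PySem.List.slice_to p (by omega)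
  have hslice2 : PySem.List.slice p (some (idx + 1)) none = List.drop (idx + 1).toNat p :=
    PySem.List.slice_from p (by omega)
  have hmap : (((List.take (idx + 1).toNat p).reverse.zip (List.drop (idx + 1).toNat p)).map
        (fun ab => ((ab.1.toList.zip ab.2.toList).map
          (fun xy => if xy.1 ≠ xy.2 then (1 : Int) else 0)).sum))
      = (((List.take (idx + 1).toNat p).reverse.zip (List.drop (idx + 1).toNat p)).map
          (fun ab => pvCountDiffs ab.1 ab.2)) :=
    List.map_congr_left (fun ab _ => pvCountDiffs_alt ab.1 ab.2)
  rw [hslice1, PySem.List.slice?_none_none_neg_one]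
  simp only [Option.getD_some, hslice2, hmap, pvAlt_diffs_eq p idx hge (by omega)]
  exact pv_body_eq p a idx acc hge (by omega)
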